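-- pv_equiv track=rewrite | github.com/walkccc/LeetCode | solutions/3400. Maximum Number of Matching Indices After Right Shifts/3400.py | maximumMatchingIndices
-- ===== SOURCE A (Python) =====
-- def maximumMatchingIndices(nums1: list[int], nums2: list[int]) -> int:
--   n = len(nums1)
--   ans = 0
--
--   for shift in range(n):
--     matches = 0
--     for i, num2 in enumerate(nums2):
--       if nums1[(i + shift) % n] == num2:
--         matches += 1
--     ans = max(ans, matches)
--
--   return ans
-- ===== SOURCE B (Python) =====
-- def maximumMatchingIndices(nums1: list[int], nums2: list[int]) -> int:
--   n = len(nums1)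
--   if n == 0:
--     return 0
--   idx = {}
--   for j, v in enumerate(nums1):
--     idx.setdefault(v, []).append(j)
--   count = [0] * n
--   for i, v in enumerate(nums2):
--     for j in idx.get(v, []):
--       count[(j - i) % n] += 1
--   return max(count)
-- ===== Notes on version B (the rewrite author's own statement) =====
-- stated objective: alternative
-- what changed: Instead of recounting matches for every shift (nested loops over shifts x positions), B builds a value-to-indices dict over nums1 once and accumulates a per-shift match histogram in one pass over nums2 (each matching pair (i,j) contributes to shift (j-i) mod n), returning the histogram maximum.
import Mathlib
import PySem

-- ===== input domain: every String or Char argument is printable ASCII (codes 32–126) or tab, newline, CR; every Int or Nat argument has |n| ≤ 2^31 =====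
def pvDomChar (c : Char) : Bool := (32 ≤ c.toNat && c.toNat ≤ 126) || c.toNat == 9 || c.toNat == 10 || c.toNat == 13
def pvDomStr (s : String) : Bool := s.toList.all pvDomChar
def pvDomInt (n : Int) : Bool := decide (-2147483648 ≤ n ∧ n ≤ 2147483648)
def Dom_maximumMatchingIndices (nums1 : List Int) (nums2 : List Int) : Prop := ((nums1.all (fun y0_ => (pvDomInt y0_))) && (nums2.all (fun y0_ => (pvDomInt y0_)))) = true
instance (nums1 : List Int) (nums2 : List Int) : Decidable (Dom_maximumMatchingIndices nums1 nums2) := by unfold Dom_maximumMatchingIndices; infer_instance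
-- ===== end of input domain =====

-- B replaces A's shift-by-shift recount with a one-pass per-shift match histogram
-- (dict of indices over nums1, each matching pair credited to shift (j-i) mod n).

-- ===== PORT A =====
def maximumMatchingIndices (nums1 : List Int) (nums2 : List Int) : Int :=
  let n : Int := nums1.length
  (PySem.List.pyRange 0 n 1).foldl (fun ans shift =>
    let matchCnt : Int := (PySem.List.enumerate nums2).foldl (fun m p =>
      if PySem.List.pyGet? nums1 (PySem.Int.mod (p.1 + shift) n) = some p.2 then m + 1 else m) 0
    max ans matchCnt) 0

-- ===== PORT B =====
-- 'count[(j - i) % n] += 1' is ported by hand as List.set/getD at a Nat index; exact here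
-- since the Python index (j - i) % n is always in [0, n) = [0, count.length).
def maximumMatchingIndices_alt (nums1 : List Int) (nums2 : List Int) : Int :=
  let n : Int := nums1.length
  if n = 0 then 0 else
  let idx : PySem.Dict Int (List Int) :=
    (PySem.List.enumerate nums1).foldl
      (fun d p => d.insert p.2 (d.getD p.2 [] ++ [p.1])) PySem.Dict.empty
  let count : List Int :=
    (PySem.List.enumerate nums2).foldl
      (fun c p => (idx.getD p.2 []).foldl
        (fun c j =>
          let k := (PySem.Int.mod (j - p.1) n).toNat
          c.set k (c.getD k 0 + 1)) c)
      (List.replicate n.toNat 0)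
  match PySem.List.max? count (fun y => y) with
  | some m => m
  | none => 0

-- ===== PRECONDITION & SPEC =====
def Spec_maximumMatchingIndices (nums1 : List Int) (nums2 : List Int) (out : Int) : Prop := out = maximumMatchingIndices_alt nums1 nums2
instance (nums1 : List Int) (nums2 : List Int) (out : Int) : Decidable (Spec_maximumMatchingIndices nums1 nums2 out) := by unfold Spec_maximumMatchingIndices; infer_instance

-- ===== CLAIM (what is proved, stated in full; the proofs are below) =====
def Claim_equal_maximumMatchingIndices : Prop := ∀ (nums1 : List Int) (nums2 : List Int), Dom_maximumMatchingIndices nums1 nums2 → Spec_maximumMatchingIndices nums1 nums2 (maximumMatchingIndices nums1 nums2)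

-- ===== LEMMAS AND PROOFS =====

-- A's inner loop: number of matching indices at shift s
def mA (nums1 nums2 : List Int) (s : Int) : Int :=
  (PySem.List.enumerate nums2).foldl (fun m p =>
    if PySem.List.pyGet? nums1 (PySem.Int.mod (p.1 + s) (nums1.length : Int)) = some p.2 then m + 1 else m) 0

theorem mA_eq_countP (nums1 nums2 : List Int) (s : Int) :
    mA nums1 nums2 s = ((PySem.List.enumerate nums2).countP
      (fun p => decide (PySem.List.pyGet? nums1 (PySem.Int.mod (p.1 + s) (nums1.length : Int)) = some p.2)) : Int) := by
  rw [mA, PySem.List.foldl_ite_add_one]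
  simp

theorem mA_nonneg (nums1 nums2 : List Int) (s : Int) : 0 ≤ mA nums1 nums2 s := by
  rw [mA_eq_countP]; exact Int.natCast_nonneg _

-- the list of indices of v in nums1 (what B's dict maps v to)
def Jidx (nums1 : List Int) (v : Int) : List Int :=
  ((PySem.List.enumerate nums1).filter (fun p => p.2 == v)).map (fun p => p.1)

theorem dict_build (ps : List (Int × Int)) (d : PySem.Dict Int (List Int)) (v : Int) :
    (ps.foldl (fun d p => d.insert p.2 (d.getD p.2 [] ++ [p.1])) d).getD v []
      = d.getD v [] ++ (ps.filter (fun p => p.2 == v)).map (fun p => p.1) := by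
  induction ps generalizing d with
  | nil => simp
  | cons p ps ih =>
    rw [List.foldl_cons, ih, List.filter_cons]
    by_cases h : p.2 = v
    · simp [h]
    · simp [PySem.Dict.getD_insert, Ne.symm h, h]

theorem mem_Jidx (nums1 : List Int) (v j : Int) :
    j ∈ Jidx nums1 v ↔ 0 ≤ j ∧ j < (nums1.length : Int) ∧ PySem.List.pyGet? nums1 j = some v := by
  simp only [Jidx, List.mem_map, List.mem_filter, PySem.List.mem_enumerate_iff]
  constructor
  · rintro ⟨p, ⟨⟨k, hk, rfl⟩, hv⟩, rfl⟩
    simp only [beq_iff_eq] at hv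
    have h1 : ((0:Int) + (k:Int)) = (k:Int) := by omega
    refine ⟨by omega, by omega, ?_⟩
    simp only [h1, PySem.List.pyGet?_natCast, List.getElem?_eq_getElem hk]
    simp [hv]
  · rintro ⟨h0, hn, hget⟩
    obtain ⟨k, rfl⟩ : ∃ k : ℕ, j = (k : Int) := ⟨j.toNat, by omega⟩
    have hkn : k < nums1.length := by exact_mod_cast hn
    rw [PySem.List.pyGet?_natCast, List.getElem?_eq_getElem hkn] at hget
    have hv : nums1[k] = v := Option.some_inj.mp hget
    exact ⟨((k:Int), v), ⟨⟨k, hkn, by simp [hv]⟩, by simp⟩, rfl⟩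

theorem nodup_Jidx (nums1 : List Int) (v : Int) : (Jidx nums1 v).Nodup := by
  have h1 := PySem.List.pairwise_lt_enumerate nums1 0
  have h2 := h1.filter (fun p => p.2 == v)
  have h3 : (((PySem.List.enumerate nums1).filter (fun p => p.2 == v)).map (fun p => p.1)).Pairwise (· < ·) :=
    List.pairwise_map.mpr h2
  exact h3.imp ne_of_lt

-- key modular fact: a pair (i, j) is credited to shift s exactly when j is the index A probes at shift s
theorem mod_key (N : ℕ) (hpos : 0 < N) (i : Int) (s : ℕ) (hs : s < N) (j : Int)
    (hj0 : 0 ≤ j) (hjn : j < (N : Int)) :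
    ((PySem.Int.mod (j - i) (N : Int)).toNat = s ↔ j = PySem.Int.mod (i + (s : Int)) (N : Int)) := by
  have hn : (0:Int) < (N:Int) := by exact_mod_cast hpos
  rw [PySem.Int.mod_eq_emod_of_pos hn, PySem.Int.mod_eq_emod_of_pos hn]
  have hnn : (0:Int) ≤ (j - i) % (N:Int) := Int.emod_nonneg _ (by omega)
  have key : (j - i) % (N:Int) = (s:Int) ↔ j = (i + (s:Int)) % (N:Int) := by
    constructor
    · intro h
      have hq : j - i = (N:Int) * ((j - i) / (N:Int)) + (s:Int) := by
        conv_lhs => rw [← Int.mul_ediv_add_emod (j - i) (N:Int)]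
        rw [h]
      have h2 : i + (s:Int) = j + (N:Int) * (-((j - i) / (N:Int))) := by linarith
      rw [h2, Int.add_mul_emod_self_left, Int.emod_eq_of_lt hj0 hjn]
    · intro h
      have hq : i + (s:Int) = (N:Int) * ((i + (s:Int)) / (N:Int)) + j := by
        conv_lhs => rw [← Int.mul_ediv_add_emod (i + (s:Int)) (N:Int)]
        rw [← h]
      have h2 : j - i = (s:Int) + (N:Int) * (-((i + (s:Int)) / (N:Int))) := by linarith
      rw [h2, Int.add_mul_emod_self_left, Int.emod_eq_of_lt (by omega) (by exact_mod_cast hs)]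
  omega

-- the increments contributed by one position i of nums2 holding value v hit shift s 0 or 1 times,
-- exactly when A's probe at shift s matches
theorem count_incr (nums1 : List Int) (hpos : 0 < nums1.length) (i : Int) (v : Int) (s : ℕ)
    (hs : s < nums1.length) :
    ((Jidx nums1 v).map (fun j => (PySem.Int.mod (j - i) (nums1.length : Int)).toNat)).count s
      = if PySem.List.pyGet? nums1 (PySem.Int.mod (i + (s : Int)) (nums1.length : Int)) = some v then 1 else 0 := by
  have hn0 : (0:Int) < (nums1.length : Int) := by exact_mod_cast hpos
  have hr0 : 0 ≤ PySem.Int.mod (i + (s : Int)) (nums1.length : Int) := PySem.Int.mod_nonneg _ hn0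
  have hrn : PySem.Int.mod (i + (s : Int)) (nums1.length : Int) < (nums1.length : Int) :=
    PySem.Int.mod_lt _ hn0
  rw [List.count_eq_countP, List.countP_map]
  have hcongr : ∀ j ∈ Jidx nums1 v,
      (((fun x => x == s) ∘ fun j => (PySem.Int.mod (j - i) (nums1.length : Int)).toNat) j = true
        ↔ (j == PySem.Int.mod (i + (s : Int)) (nums1.length : Int)) = true) := by
    intro j hj
    obtain ⟨hj0, hjn, -⟩ := (mem_Jidx nums1 v j).mp hj
    simp only [Function.comp, beq_iff_eq]
    exact mod_key nums1.length hpos i s hs j hj0 hjn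
  rw [List.countP_congr hcongr, ← List.count_eq_countP]
  by_cases hmem : (PySem.Int.mod (i + (s : Int)) (nums1.length : Int)) ∈ Jidx nums1 v
  · rw [List.count_eq_one_of_mem (nodup_Jidx nums1 v) hmem]
    have := (mem_Jidx nums1 v _).mp hmem
    rw [if_pos this.2.2]
  · rw [List.count_eq_zero.mpr hmem]
    have hng : ¬ PySem.List.pyGet? nums1 (PySem.Int.mod (i + (s : Int)) (nums1.length : Int)) = some v := by
      intro hget
      exact hmem ((mem_Jidx nums1 v _).mpr ⟨hr0, hrn, hget⟩)
    rw [if_neg hng]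

theorem foldl_set_len (ks : List ℕ) (c : List Int) :
    (ks.foldl (fun c k => c.set k (c.getD k 0 + 1)) c).length = c.length := by
  induction ks generalizing c with
  | nil => rfl
  | cons k ks ih => rw [List.foldl_cons, ih, List.length_set]

theorem foldl_set_getD (ks : List ℕ) (c : List Int) (s : ℕ) (hs : s < c.length)
    (hk : ∀ k ∈ ks, k < c.length) :
    (ks.foldl (fun c k => c.set k (c.getD k 0 + 1)) c).getD s 0 = c.getD s 0 + (ks.count s : Int) := by
  induction ks generalizing c with
  | nil => simp
  | cons k ks ih =>
    rw [List.foldl_cons]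
    have hk' : ∀ k' ∈ ks, k' < (c.set k (c.getD k 0 + 1)).length := by
      intro k' hm; rw [List.length_set]; exact hk k' (List.mem_cons_of_mem _ hm)
    rw [ih _ (by rw [List.length_set]; exact hs) hk']
    have hkc : k < c.length := hk k List.mem_cons_self
    rw [List.getD_eq_getElem _ _ (by rwa [List.length_set]), List.getElem_set,
        List.getD_eq_getElem _ _ hs, List.getD_eq_getElem _ _ hkc]
    by_cases h : k = s
    · subst h; rw [if_pos rfl, List.count_cons_self]; push_cast; ring
    · rw [if_neg h, List.count_cons]
      have hb : (k == s) = false := beq_false_of_ne h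
      rw [hb]
      simp

-- the whole histogram loop, pointwise: after processing qs, slot s holds the number of
-- (position, value) pairs of qs that A's shift-s probe matches
theorem histogram (nums1 : List Int) (hpos : 0 < nums1.length) (qs : List (Int × Int)) (c : List Int)
    (hlen : c.length = nums1.length) (s : ℕ) (hs : s < nums1.length) :
    (qs.foldl (fun c p => ((Jidx nums1 p.2).map
        (fun j => (PySem.Int.mod (j - p.1) (nums1.length : Int)).toNat)).foldl
        (fun c k => c.set k (c.getD k 0 + 1)) c) c).getD s 0
      = c.getD s 0 + (qs.countP
          (fun p => decide (PySem.List.pyGet? nums1 (PySem.Int.mod (p.1 + (s : Int)) (nums1.length : Int)) = some p.2)) : Int) := by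
  have hn0 : (0:Int) < (nums1.length : Int) := by exact_mod_cast hpos
  induction qs generalizing c with
  | nil => simp
  | cons q qs ih =>
    rw [List.foldl_cons]
    have hlen' : (((Jidx nums1 q.2).map
        (fun j => (PySem.Int.mod (j - q.1) (nums1.length : Int)).toNat)).foldl
        (fun c k => c.set k (c.getD k 0 + 1)) c).length = nums1.length := by
      rw [foldl_set_len]; exact hlen
    rw [ih _ hlen']
    have hk : ∀ k ∈ (Jidx nums1 q.2).map
        (fun j => (PySem.Int.mod (j - q.1) (nums1.length : Int)).toNat), k < c.length := by
      intro k hm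
      obtain ⟨j, -, rfl⟩ := List.mem_map.mp hm
      have h1 : PySem.Int.mod (j - q.1) (nums1.length : Int) < (nums1.length : Int) :=
        PySem.Int.mod_lt _ hn0
      rw [hlen]; omega
    rw [foldl_set_getD _ _ _ (by omega) hk, count_incr nums1 hpos q.1 q.2 s hs, List.countP_cons]
    push_cast
    split_ifs with h1 <;> simp_all <;> ring

theorem histogram_len (nums1 : List Int) (qs : List (Int × Int)) (c : List Int) :
    (qs.foldl (fun c p => ((Jidx nums1 p.2).map
        (fun j => (PySem.Int.mod (j - p.1) (nums1.length : Int)).toNat)).foldl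
        (fun c k => c.set k (c.getD k 0 + 1)) c) c).length = c.length := by
  induction qs generalizing c with
  | nil => rfl
  | cons q qs ih => rw [List.foldl_cons, ih, foldl_set_len]

theorem main_eq (nums1 nums2 : List Int) :
    maximumMatchingIndices nums1 nums2 = maximumMatchingIndices_alt nums1 nums2 := by
  by_cases h0 : nums1.length = 0
  · have hn : (nums1.length : Int) = 0 := by exact_mod_cast h0
    rw [maximumMatchingIndices, maximumMatchingIndices_alt]
    simp only [hn, PySem.List.pyRange_one_eq_nil (by omega : (0:Int) ≤ 0)]
    rfl
  · have hpos : 0 < nums1.length := Nat.pos_of_ne_zero h0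
    have hn0 : (0:Int) < (nums1.length : Int) := by exact_mod_cast hpos
    -- A is a running max over the per-shift match counts
    have hA : maximumMatchingIndices nums1 nums2
        = ((PySem.List.pyRange 0 (nums1.length : Int) 1).map (mA nums1 nums2)).foldl max 0 := by
      rw [List.foldl_map]; rfl
    -- B's dict lookup is Jidx
    have hidx : ∀ v : Int,
        ((PySem.List.enumerate nums1).foldl
          (fun d p => d.insert p.2 (d.getD p.2 [] ++ [p.1])) PySem.Dict.empty).getD v []
        = Jidx nums1 v := by
      intro v
      rw [dict_build]
      simp [Jidx]
    -- B, with the dict lookup replaced by Jidx and the inner loop written over the mapped slots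
    have hB : maximumMatchingIndices_alt nums1 nums2
        = match PySem.List.max? ((PySem.List.enumerate nums2).foldl
            (fun c p => ((Jidx nums1 p.2).map
              (fun j => (PySem.Int.mod (j - p.1) (nums1.length : Int)).toNat)).foldl
              (fun c k => c.set k (c.getD k 0 + 1)) c)
            (List.replicate (nums1.length : Int).toNat 0)) (fun y => y) with
          | some m => m
          | none => 0 := by
      have hfun : (fun (c : List Int) (p : Int × Int) =>
            (((PySem.List.enumerate nums1).foldl
              (fun d p => d.insert p.2 (d.getD p.2 [] ++ [p.1])) PySem.Dict.empty).getD p.2 []).foldl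
              (fun c j => c.set (PySem.Int.mod (j - p.1) (nums1.length : Int)).toNat
                (c.getD (PySem.Int.mod (j - p.1) (nums1.length : Int)).toNat 0 + 1)) c)
          = (fun (c : List Int) (p : Int × Int) => ((Jidx nums1 p.2).map
              (fun j => (PySem.Int.mod (j - p.1) (nums1.length : Int)).toNat)).foldl
              (fun c k => c.set k (c.getD k 0 + 1)) c) := by
        funext c p
        rw [hidx]
        exact (List.foldl_map
          (f := fun j => (PySem.Int.mod (j - p.1) (nums1.length : Int)).toNat)
          (g := fun (c : List Int) (k : ℕ) => c.set k (c.getD k 0 + 1))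
          (l := Jidx nums1 p.2) (init := c)).symm
      rw [maximumMatchingIndices_alt]
      simp only [if_neg (by omega : ¬ (nums1.length : Int) = 0)]
      rw [hfun]
    -- the histogram list is exactly the list of per-shift match counts
    have hcl : ((PySem.List.enumerate nums2).foldl
        (fun c p => ((Jidx nums1 p.2).map
          (fun j => (PySem.Int.mod (j - p.1) (nums1.length : Int)).toNat)).foldl
          (fun c k => c.set k (c.getD k 0 + 1)) c)
        (List.replicate ((nums1.length : Int)).toNat (0 : Int))).length = nums1.length := by
      have h := histogram_len nums1 (PySem.List.enumerate nums2)
        (List.replicate ((nums1.length : Int)).toNat (0 : Int))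
      exact h.trans (by rw [List.length_replicate, Int.toNat_natCast])
    have hmap : ((PySem.List.enumerate nums2).foldl
        (fun c p => ((Jidx nums1 p.2).map
          (fun j => (PySem.Int.mod (j - p.1) (nums1.length : Int)).toNat)).foldl
          (fun c k => c.set k (c.getD k 0 + 1)) c)
        (List.replicate ((nums1.length : Int)).toNat (0 : Int)))
        = (PySem.List.pyRange 0 (nums1.length : Int) 1).map (mA nums1 nums2) := by
      apply List.ext_getElem
      · rw [hcl, List.length_map, PySem.List.length_pyRange_one]; omega
      · intro k hk1 hk2
        have hkN : k < nums1.length := by rwa [hcl] at hk1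
        rw [List.getElem_map, PySem.List.getElem_pyRange_one,
            ← List.getD_eq_getElem _ 0 hk1,
            histogram nums1 hpos _ _ (by rw [List.length_replicate, Int.toNat_natCast]) k hkN,
            mA_eq_countP]
        simp
    rw [hA, hB, hmap, PySem.List.pyRange_one_cons hn0, List.map_cons, PySem.List.max?_id_cons,
        List.foldl_cons, max_eq_right (mA_nonneg nums1 nums2 0)]

-- ===== VERDICT (by name: the statement is the Claim_ definition above) =====
theorem maximumMatchingIndices_spec : Claim_equal_maximumMatchingIndices := by
  intro nums1 nums2 _
  unfold Spec_maximumMatchingIndices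
  exact main_eq nums1 nums2
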